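-- pv_equiv track=rewrite | github.com/Hal-ws/--Algorithm-Problem-Solving | 21609.py | cntRainbow
-- ===== SOURCE A (Python) =====
-- def cntRainbow(groupList, board):
--     result = []
--     maxCnt = 0
--     for group in groupList:
--         cnt = 0
--         for pos in group:
--             y, x = pos[0], pos[1]
--             if board[y][x] == 0:
--                 cnt += 1
--         if cnt < maxCnt:
--             continue
--         if cnt > maxCnt:
--             result = [] # 리셋
--             maxCnt = cnt
--         result.append(sorted(group))
--     return result
-- ===== SOURCE B (Python) =====
-- def cntRainbow(groupList, board):
--     counts = [sum(1 for pos in group if board[pos[0]][pos[1]] == 0) for group in groupList]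
--     m = max(counts, default=0)
--     return [sorted(group) for group, c in zip(groupList, counts) if c == m]
-- ===== Notes on version B (the rewrite author's own statement) =====
-- stated objective: simpler
-- what changed: Replaces A's single pass with running-max and result-reset state by a two-pass structure: compute a zero-count per group, take the overall max, then filter the groups whose count equals it.
import Mathlib
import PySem

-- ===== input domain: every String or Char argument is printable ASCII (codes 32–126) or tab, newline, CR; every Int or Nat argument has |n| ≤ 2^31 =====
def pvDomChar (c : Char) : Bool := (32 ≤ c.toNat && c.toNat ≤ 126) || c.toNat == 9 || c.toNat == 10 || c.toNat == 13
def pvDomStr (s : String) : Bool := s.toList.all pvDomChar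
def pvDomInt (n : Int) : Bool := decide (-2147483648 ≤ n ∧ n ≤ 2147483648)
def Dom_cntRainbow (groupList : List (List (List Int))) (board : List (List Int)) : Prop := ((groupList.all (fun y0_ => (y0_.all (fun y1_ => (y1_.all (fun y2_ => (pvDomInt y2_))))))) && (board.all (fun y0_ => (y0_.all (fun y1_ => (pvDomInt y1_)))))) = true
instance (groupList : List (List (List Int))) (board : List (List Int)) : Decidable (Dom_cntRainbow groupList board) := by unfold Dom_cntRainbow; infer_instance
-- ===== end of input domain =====

-- B replaces A's running-max/reset single pass by count-per-group, overall max, then filter (objective: simpler).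

-- ===== PORT A =====
-- A's loop state is (result, maxCnt); inner loop counts zero cells of the group.
def cntRainbow (groupList : List (List (List Int))) (board : List (List Int)) : List (List (List Int)) :=
  (groupList.foldl
    (fun st group =>
      let cnt : Int := group.foldl
        (fun cnt pos =>
          let y := PySem.List.pyGetD pos 0 0
          let x := PySem.List.pyGetD pos 1 0
          if PySem.List.pyGetD (PySem.List.pyGetD board y []) x 0 = 0 then cnt + 1 else cnt) 0
      if cnt < st.2 then st
      else if cnt > st.2 then ([PySem.List.sorted group (fun v => v) false], cnt)
      else (st.1 ++ [PySem.List.sorted group (fun v => v) false], st.2))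
    (([] : List (List (List Int))), (0 : Int))).1

-- ===== PORT B =====
-- sum(1 for pos in group if board[pos[0]][pos[1]] == 0)
def zeroCount_alt (board : List (List Int)) (group : List (List Int)) : Int :=
  group.foldl
    (fun s pos =>
      s + (if PySem.List.pyGetD (PySem.List.pyGetD board (PySem.List.pyGetD pos 0 0) []) (PySem.List.pyGetD pos 1 0) 0 = 0 then 1 else 0)) 0

def cntRainbow_alt (groupList : List (List (List Int))) (board : List (List Int)) : List (List (List Int)) :=
  let counts := groupList.map (zeroCount_alt board)
  let m : Int := (PySem.List.max? counts (fun v => v)).getD 0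
  ((groupList.zip counts).filter (fun p => p.2 == m)).map (fun p => PySem.List.sorted p.1 (fun v => v) false)

-- ===== PRECONDITION & SPEC =====
-- Pre_ excludes exactly the inputs on which Python A raises an IndexError: some position has
-- fewer than 2 coordinates or addresses a cell outside the board.
def Pre_cntRainbow (groupList : List (List (List Int))) (board : List (List Int)) : Prop :=
  (groupList.all (fun group => group.all (fun pos =>
    ((PySem.List.pyGet? pos 0).bind (fun y =>
      (PySem.List.pyGet? pos 1).bind (fun x =>
        (PySem.List.pyGet? board y).bind (fun row =>
          PySem.List.pyGet? row x)))).isSome))) = true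
instance (groupList : List (List (List Int))) (board : List (List Int)) : Decidable (Pre_cntRainbow groupList board) := by unfold Pre_cntRainbow; infer_instance
def pvWitness_cntRainbow : List (List (List Int)) × List (List Int) :=
  ([[[0, 0], [0, 1]], [[1, 0]]], [[0, 1], [0, 2]])
def Spec_cntRainbow (groupList : List (List (List Int))) (board : List (List Int)) (out : List (List (List Int))) : Prop := out = cntRainbow_alt groupList board
instance (groupList : List (List (List Int))) (board : List (List Int)) (out : List (List (List Int))) : Decidable (Spec_cntRainbow groupList board out) := by unfold Spec_cntRainbow; infer_instance

-- ===== CLAIM (what is proved, stated in full; the proofs are below) =====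
def Claim_equal_cntRainbow : Prop := ∀ (groupList : List (List (List Int))) (board : List (List Int)), Dom_cntRainbow groupList board → Pre_cntRainbow groupList board → Spec_cntRainbow groupList board (cntRainbow groupList board)

-- ===== LEMMAS AND PROOFS =====

-- The two zero-counting folds compute the same value.
theorem cnt_eq (board : List (List Int)) (group : List (List Int)) :
    group.foldl
      (fun cnt pos =>
        let y := PySem.List.pyGetD pos 0 0
        let x := PySem.List.pyGetD pos 1 0
        if PySem.List.pyGetD (PySem.List.pyGetD board y []) x 0 = 0 then cnt + 1 else cnt) 0
    = zeroCount_alt board group := by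
  unfold zeroCount_alt
  congr 1
  funext cnt pos
  by_cases h : PySem.List.pyGetD (PySem.List.pyGetD board (PySem.List.pyGetD pos 0 0) []) (PySem.List.pyGetD pos 1 0) 0 = 0 <;>
    simp [h]

-- zeroCount_alt is nonnegative.
theorem zeroCount_nonneg (board : List (List Int)) (group : List (List Int)) :
    0 ≤ zeroCount_alt board group := by
  unfold zeroCount_alt
  suffices h : ∀ (l : List (List Int)) (s : Int), 0 ≤ s → 0 ≤ l.foldl
      (fun s pos =>
        s + (if PySem.List.pyGetD (PySem.List.pyGetD board (PySem.List.pyGetD pos 0 0) []) (PySem.List.pyGetD pos 1 0) 0 = 0 then 1 else 0)) s by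
    exact h group 0 le_rfl
  intro l
  induction l with
  | nil => intro s hs; simpa using hs
  | cons p t ih =>
    intro s hs
    simp only [List.foldl_cons]
    apply ih
    split <;> omega

-- Closed form of A's loop: for any start state (r, m),
-- result = (prefix r if the max did not move) ++ sorted groups whose count equals the final max.
theorem loopA_closed (board : List (List Int)) :
    ∀ (l : List (List (List Int))) (r : List (List (List Int))) (m : Int),
    l.foldl
      (fun st group =>
        if zeroCount_alt board group < st.2 then st
        else if zeroCount_alt board group > st.2 then ([PySem.List.sorted group (fun v => v) false], zeroCount_alt board group)
        else (st.1 ++ [PySem.List.sorted group (fun v => v) false], st.2))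
      (r, m)
    = ((if l.foldl (fun m g => max m (zeroCount_alt board g)) m = m then r else [])
        ++ (l.filter (fun g => zeroCount_alt board g == l.foldl (fun m g => max m (zeroCount_alt board g)) m)).map
            (fun g => PySem.List.sorted g (fun v => v) false),
       l.foldl (fun m g => max m (zeroCount_alt board g)) m) := by
  intro l
  induction l with
  | nil => intro r m; simp
  | cons g t ih =>
    intro r m
    simp only [List.foldl_cons]
    have hstart : ∀ (a : Int), a ≤ t.foldl (fun m g => max m (zeroCount_alt board g)) a := by
      intro a
      exact (PySem.List.le_foldl_max_int t (zeroCount_alt board) a).1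
    by_cases h1 : zeroCount_alt board g < m
    · have hmax : max m (zeroCount_alt board g) = m := by omega
      simp only [if_pos h1, ih, hmax]
      have hgne : ¬ (zeroCount_alt board g == t.foldl (fun m g => max m (zeroCount_alt board g)) m) = true := by
        have := hstart m
        simp only [beq_iff_eq]
        omega
      simp [hgne]
    · by_cases h2 : zeroCount_alt board g > m
      · have hmax : max m (zeroCount_alt board g) = zeroCount_alt board g := by omega
        simp only [if_neg h1, if_pos h2, ih, hmax]
        have hMne : ¬ t.foldl (fun m g => max m (zeroCount_alt board g)) (zeroCount_alt board g) = m := by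
          have := hstart (zeroCount_alt board g)
          omega
        by_cases h3 : t.foldl (fun m g => max m (zeroCount_alt board g)) (zeroCount_alt board g) = zeroCount_alt board g
        · simp [h3]
          intro h; exact absurd h (by omega)
        · simp [h3, Ne.symm h3]
          intro h; exact absurd h hMne
      · have heq : zeroCount_alt board g = m := by omega
        have hmax : max m (zeroCount_alt board g) = m := by omega
        simp only [if_neg h1, if_neg h2, ih, hmax]
        by_cases h3 : t.foldl (fun m g => max m (zeroCount_alt board g)) m = m
        · have h4 : (zeroCount_alt board g == t.foldl (fun m g => max m (zeroCount_alt board g)) m) = true := by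
            simp [heq, h3]
          simp [h3, heq]
        · have h4 : ¬ (zeroCount_alt board g == t.foldl (fun m g => max m (zeroCount_alt board g)) m) = true := by
            simp only [beq_iff_eq]
            omega
          simp [h3, h4]

-- B's max over the count list equals A's running max started at 0.
theorem max_counts_eq (board : List (List Int)) (l : List (List (List Int))) :
    ((PySem.List.max? (l.map (zeroCount_alt board)) (fun v => v)).getD 0)
    = l.foldl (fun m g => max m (zeroCount_alt board g)) 0 := by
  cases l with
  | nil => simp [PySem.List.max?]
  | cons g t =>
    simp only [List.map_cons, PySem.List.max?_id_cons, Option.getD_some, List.foldl_cons]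
    have h1 : (t.map (zeroCount_alt board)).foldl max (zeroCount_alt board g)
        = t.foldl (fun m g => max m (zeroCount_alt board g)) (zeroCount_alt board g) := by
      rw [List.foldl_map]
    have h0 : 0 ≤ zeroCount_alt board g := zeroCount_nonneg board g
    have hmax : max 0 (zeroCount_alt board g) = zeroCount_alt board g := by omega
    rw [h1, hmax]

-- zip-with-counts filter/map collapses to a plain filter/map over the groups.
theorem zip_filter_map (board : List (List Int)) (m : Int) (l : List (List (List Int))) :
    ((l.zip (l.map (zeroCount_alt board))).filter (fun p => p.2 == m)).map
        (fun p => PySem.List.sorted p.1 (fun v => v) false)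
    = (l.filter (fun g => zeroCount_alt board g == m)).map (fun g => PySem.List.sorted g (fun v => v) false) := by
  induction l with
  | nil => simp
  | cons g t ih =>
    simp only [List.map_cons, List.zip_cons_cons, List.filter_cons]
    by_cases h : (zeroCount_alt board g == m) = true
    · simp [h, ih]
    · simp [h, ih]

-- ===== VERDICT (by name: the statement is the Claim_ definition above) =====
theorem cntRainbow_spec : Claim_equal_cntRainbow := by
  intro groupList board _ _
  unfold Spec_cntRainbow cntRainbow cntRainbow_alt
  simp only [cnt_eq]
  rw [loopA_closed board groupList [] 0]
  simp only [max_counts_eq, zip_filter_map]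
  split <;> simp
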